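-- pv_equiv track=rewrite | github.com/GlobalWaveGroup/stage2_abc | merge_engine_v3.py | amplitude_merge_one_pass
-- ===== SOURCE A (Python) =====
-- def _check_amp_merge(p1, p2, p3, p4):
--     """检查4拐点是否满足幅度归并条件：P1和P4分别为极值"""
--     prices = [p1[1], p2[1], p3[1], p4[1]]
--     max_idx = prices.index(max(prices))
--     min_idx = prices.index(min(prices))
--     return (max_idx == 0 and min_idx == 3) or (max_idx == 3 and min_idx == 0)
--
-- def amplitude_merge_one_pass(pivots):
--     """
--     对拐点序列做一轮幅度归并。
--
--     双重职责：
--     1. 滑窗收集：逐个检查所有相邻4拐点组，所有满足条件的都记录新线段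
--     2. 贪心推进：产生下一级拐点序列
--
--     返回: (新拐点列表, 是否有变化, 滑窗发现的所有新线段)
--     """
--     if len(pivots) < 4:
--         return pivots, False, []
--
--     # === 滑窗收集：所有满足条件的三波 ===
--     all_found = []
--     for i in range(len(pivots) - 3):
--         p1, p2, p3, p4 = pivots[i], pivots[i+1], pivots[i+2], pivots[i+3]
--         if _check_amp_merge(p1, p2, p3, p4):
--             all_found.append((p1, p4))  # 记录首尾拐点对
--
--     # === 贪心推进 ===
--     result = []
--     changed = False
--     i = 0
--     while i < len(pivots):
--         if i + 3 < len(pivots):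
--             p1, p2, p3, p4 = pivots[i], pivots[i+1], pivots[i+2], pivots[i+3]
--             if _check_amp_merge(p1, p2, p3, p4):
--                 result.append(p1)
--                 i += 3
--                 changed = True
--                 continue
--         result.append(pivots[i])
--         i += 1
--
--     return result, changed, all_found
-- ===== SOURCE B (Python) =====
-- def amplitude_merge_one_pass(pivots):
--     if len(pivots) < 4:
--         return pivots, False, []
--
--     def _amp(p1, p2, p3, p4):
--         # P1/P4 extremum test via the middle pair's band [lo, hi]
--         a, d = p1[1], p4[1]
--         lo = p2[1] if p2[1] < p3[1] else p3[1]
--         hi = p2[1] if p2[1] > p3[1] else p3[1]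
--         return (hi <= a and d < lo) or (a <= lo and hi < d)
--
--     # scan pass: consume a reversed copy as a stack, peeking 4 deep, popping 1
--     scan = pivots[::-1]
--     found = []
--     while len(scan) >= 4:
--         if _amp(scan[-1], scan[-2], scan[-3], scan[-4]):
--             found.append((scan[-1], scan[-4]))
--         scan.pop()
--
--     # greedy pass: consume another reversed stack, popping 3 on a merge
--     stack = pivots[::-1]
--     out = []
--     changed = False
--     while stack:
--         if len(stack) >= 4 and _amp(stack[-1], stack[-2], stack[-3], stack[-4]):
--             out.append(stack.pop())
--             stack.pop()
--             stack.pop()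
--             changed = True
--         else:
--             out.append(stack.pop())
--     return out, changed, found
-- ===== Notes on version B (the rewrite author's own statement) =====
-- stated objective: alternative
-- what changed: B replaces A's two index-driven forward scans (range/while with i, i+1, i+2, i+3 and a per-window list/max/min/.index predicate) by stack consumption: each pass pops a reversed copy of the list, peeking four deep and popping 1 (scan) or 3 (merge), with the predicate reformulated as a band comparison against the middle pair's min/max.
import Mathlib
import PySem

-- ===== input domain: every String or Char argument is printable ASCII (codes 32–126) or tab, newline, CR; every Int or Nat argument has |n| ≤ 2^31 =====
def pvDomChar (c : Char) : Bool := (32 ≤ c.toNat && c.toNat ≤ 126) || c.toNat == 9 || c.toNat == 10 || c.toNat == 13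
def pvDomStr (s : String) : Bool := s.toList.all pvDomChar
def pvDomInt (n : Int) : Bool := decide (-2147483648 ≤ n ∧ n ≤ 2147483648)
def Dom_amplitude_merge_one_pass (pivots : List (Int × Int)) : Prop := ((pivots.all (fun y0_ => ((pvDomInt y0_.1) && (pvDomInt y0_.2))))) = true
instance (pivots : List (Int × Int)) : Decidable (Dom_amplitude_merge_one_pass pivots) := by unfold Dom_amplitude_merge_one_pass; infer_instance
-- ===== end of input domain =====

set_option maxHeartbeats 1000000


-- B replaces A's index-driven forward scans and list/max/min/.index predicate by stack consumption
-- (pop a reversed copy, peek 4 deep) with a min/max-band predicate (objective: alternative).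

-- ===== PORT A =====
-- _check_amp_merge: prices list, max/min, .index (first occurrence); the options are always `some`
-- on the 4-element list, `.getD` only discharges them.
def pvCheckA (p1 p2 p3 p4 : Int × Int) : Bool :=
  let prices : List Int := [p1.2, p2.2, p3.2, p4.2]
  let mx := (PySem.List.max? prices (fun y => y)).getD 0
  let mn := (PySem.List.min? prices (fun y => y)).getD 0
  let maxIdx := (PySem.List.index? prices mx).getD 0
  let minIdx := (PySem.List.index? prices mn).getD 0
  (maxIdx == 0 && minIdx == 3) || (maxIdx == 3 && minIdx == 0)

-- the sliding-window collection loop of A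
def pvScanA (pivots : List (Int × Int)) : List ((Int × Int) × (Int × Int)) :=
  (PySem.List.pyRange 0 ((pivots.length : Int) - 3) 1).foldl (fun acc i =>
    let p1 := PySem.List.pyGetD pivots i (0, 0)
    let p2 := PySem.List.pyGetD pivots (i + 1) (0, 0)
    let p3 := PySem.List.pyGetD pivots (i + 2) (0, 0)
    let p4 := PySem.List.pyGetD pivots (i + 3) (0, 0)
    if pvCheckA p1 p2 p3 p4 then acc ++ [(p1, p4)] else acc) []

-- the greedy while-loop of A (indices provably in range at each access)
def pvGreedyA (pivots : List (Int × Int)) (i : Nat) (result : List (Int × Int)) (changed : Bool) :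
    List (Int × Int) × Bool :=
  if i < pivots.length then
    if i + 3 < pivots.length then
      let p1 := pivots.getD i (0, 0)
      let p2 := pivots.getD (i + 1) (0, 0)
      let p3 := pivots.getD (i + 2) (0, 0)
      let p4 := pivots.getD (i + 3) (0, 0)
      if pvCheckA p1 p2 p3 p4 then
        pvGreedyA pivots (i + 3) (result ++ [p1]) true
      else
        pvGreedyA pivots (i + 1) (result ++ [pivots.getD i (0, 0)]) changed
    else
      pvGreedyA pivots (i + 1) (result ++ [pivots.getD i (0, 0)]) changed
  else (result, changed)
  termination_by pivots.length - i

def amplitude_merge_one_pass (pivots : List (Int × Int)) :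
    (List (Int × Int)) × Bool × (List ((Int × Int) × (Int × Int))) :=
  if pivots.length < 4 then (pivots, false, []) else
    let allFound := pvScanA pivots
    let rc := pvGreedyA pivots 0 [] false
    (rc.1, rc.2, allFound)

-- ===== PORT B =====
-- B's _amp: band test against the middle pair's min/max (conditional expressions in the Python)
def pvAmp (p1 p2 p3 p4 : Int × Int) : Bool :=
  let a := p1.2
  let d := p4.2
  let lo := if p2.2 < p3.2 then p2.2 else p3.2
  let hi := if p2.2 > p3.2 then p2.2 else p3.2
  (decide (hi ≤ a) && decide (d < lo)) || (decide (a ≤ lo) && decide (hi < d))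

-- B's scan pass pops a reversed copy of pivots from the end, peeking four deep; the Python
-- stack's top-to-bottom order (scan[-1], scan[-2], …) is literally this Lean list consumed at
-- the head, element for element.
def pvScanB : List (Int × Int) → List ((Int × Int) × (Int × Int))
  | p1 :: p2 :: p3 :: p4 :: rest =>
      (if pvAmp p1 p2 p3 p4 then [(p1, p4)] else []) ++ pvScanB (p2 :: p3 :: p4 :: rest)
  | _ => []

-- B's greedy pass: same stack representation; a merge pops three, otherwise pop one.
def pvGreedyB (stack : List (Int × Int)) (out : List (Int × Int)) (changed : Bool) :
    List (Int × Int) × Bool :=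
  match stack with
  | p1 :: p2 :: p3 :: p4 :: rest =>
      if pvAmp p1 p2 p3 p4 then pvGreedyB (p4 :: rest) (out ++ [p1]) true
      else pvGreedyB (p2 :: p3 :: p4 :: rest) (out ++ [p1]) changed
  | x :: rest => pvGreedyB rest (out ++ [x]) changed
  | [] => (out, changed)
  termination_by stack.length
  decreasing_by all_goals (simp_all; try omega)

def amplitude_merge_one_pass_alt (pivots : List (Int × Int)) :
    (List (Int × Int)) × Bool × (List ((Int × Int) × (Int × Int))) :=
  if pivots.length < 4 then (pivots, false, []) else
    let found := pvScanB pivots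
    let rc := pvGreedyB pivots [] false
    (rc.1, rc.2, found)

-- ===== PRECONDITION & SPEC =====
def Spec_amplitude_merge_one_pass (pivots : List (Int × Int)) (out : (List (Int × Int)) × Bool × (List ((Int × Int) × (Int × Int)))) : Prop := out = amplitude_merge_one_pass_alt pivots
instance (pivots : List (Int × Int)) (out : (List (Int × Int)) × Bool × (List ((Int × Int) × (Int × Int)))) : Decidable (Spec_amplitude_merge_one_pass pivots out) := by unfold Spec_amplitude_merge_one_pass; infer_instance

-- ===== CLAIM (what is proved, stated in full; the proofs are below) =====
def Claim_equal_amplitude_merge_one_pass : Prop := ∀ (pivots : List (Int × Int)), Dom_amplitude_merge_one_pass pivots → Spec_amplitude_merge_one_pass pivots (amplitude_merge_one_pass pivots)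

-- ===== LEMMAS AND PROOFS =====

-- the two 4-point predicates agree
theorem pvCheck_eq (p1 p2 p3 p4 : Int × Int) :
    pvCheckA p1 p2 p3 p4 = pvAmp p1 p2 p3 p4 := by
  obtain ⟨_, a⟩ := p1; obtain ⟨_, b⟩ := p2; obtain ⟨_, c⟩ := p3; obtain ⟨_, d⟩ := p4
  have hidx : ∀ v : Int, (List.idxOf? v [a, b, c, d]).getD 0 =
      if a = v then 0 else if b = v then 1 else if c = v then 2 else if d = v then 3 else 0 := by
    intro v
    by_cases h1 : a = v <;> by_cases h2 : b = v <;> by_cases h3 : c = v <;> by_cases h4 : d = v <;>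
      simp [List.idxOf?_cons, List.idxOf?_nil, h1, h2, h3, h4]
  simp only [pvCheckA, pvAmp, PySem.List.max?_id_cons, PySem.List.min?_id_cons, List.foldl,
    PySem.List.index?_eq_idxOf?, Option.getD_some, hidx]
  set M1 := max a b with hM1
  set M2 := max M1 c with hM2
  set M3 := max M2 d with hM3
  set m1 := min a b with hm1
  set m2 := min m1 c with hm2
  set m3 := min m2 d with hm3
  have p1 : a ≤ M1 := le_max_left a b
  have p2 : b ≤ M1 := le_max_right a b
  have p3 : M1 = a ∨ M1 = b := max_choice a b
  have p4 : M1 ≤ M2 := le_max_left M1 c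
  have p5 : c ≤ M2 := le_max_right M1 c
  have p6 : M2 = M1 ∨ M2 = c := max_choice M1 c
  have p7 : M2 ≤ M3 := le_max_left M2 d
  have p8 : d ≤ M3 := le_max_right M2 d
  have p9 : M3 = M2 ∨ M3 = d := max_choice M2 d
  have q1 : m1 ≤ a := min_le_left a b
  have q2 : m1 ≤ b := min_le_right a b
  have q3 : m1 = a ∨ m1 = b := min_choice a b
  have q4 : m2 ≤ m1 := min_le_left m1 c
  have q5 : m2 ≤ c := min_le_right m1 c
  have q6 : m2 = m1 ∨ m2 = c := min_choice m1 c
  have q7 : m3 ≤ m2 := min_le_left m2 d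
  have q8 : m3 ≤ d := min_le_right m2 d
  have q9 : m3 = m2 ∨ m3 = d := min_choice m2 d
  clear_value M1 M2 M3 m1 m2 m3
  clear hM1 hM2 hM3 hm1 hm2 hm3 hidx
  have i0M : ((if a = M3 then (0:Nat) else if b = M3 then 1 else if c = M3 then 2
      else if d = M3 then 3 else 0) = 0) ↔ a = M3 := by
    split_ifs <;> simp_all <;> rcases p9 with h|h <;> rcases p6 with h'|h' <;>
      rcases p3 with h''|h'' <;> omega
  have i3M : ((if a = M3 then (0:Nat) else if b = M3 then 1 else if c = M3 then 2
      else if d = M3 then 3 else 0) = 3) ↔ (¬a = M3 ∧ ¬b = M3 ∧ ¬c = M3 ∧ d = M3) := by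
    split_ifs <;> simp_all
  have i0m : ((if a = m3 then (0:Nat) else if b = m3 then 1 else if c = m3 then 2
      else if d = m3 then 3 else 0) = 0) ↔ a = m3 := by
    split_ifs <;> simp_all <;> rcases q9 with h|h <;> rcases q6 with h'|h' <;>
      rcases q3 with h''|h'' <;> omega
  have i3m : ((if a = m3 then (0:Nat) else if b = m3 then 1 else if c = m3 then 2
      else if d = m3 then 3 else 0) = 3) ↔ (¬a = m3 ∧ ¬b = m3 ∧ ¬c = m3 ∧ d = m3) := by
    split_ifs <;> simp_all
  have cM0 : a = M3 ↔ (b ≤ a ∧ c ≤ a ∧ d ≤ a) := by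
    constructor
    · intro h; omega
    · intro h; rcases p9 with h1|h1 <;> rcases p6 with h2|h2 <;> rcases p3 with h3|h3 <;> omega
  have cM3 : (¬a = M3 ∧ ¬b = M3 ∧ ¬c = M3 ∧ d = M3) ↔ (a < d ∧ b < d ∧ c < d) := by
    constructor
    · intro h; omega
    · intro h; rcases p9 with h1|h1 <;> rcases p6 with h2|h2 <;> rcases p3 with h3|h3 <;> omega
  have cm0 : a = m3 ↔ (a ≤ b ∧ a ≤ c ∧ a ≤ d) := by
    constructor
    · intro h; omega
    · intro h; rcases q9 with h1|h1 <;> rcases q6 with h2|h2 <;> rcases q3 with h3|h3 <;> omega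
  have cm3 : (¬a = m3 ∧ ¬b = m3 ∧ ¬c = m3 ∧ d = m3) ↔ (d < a ∧ d < b ∧ d < c) := by
    constructor
    · intro h; omega
    · intro h; rcases q9 with h1|h1 <;> rcases q6 with h2|h2 <;> rcases q3 with h3|h3 <;> omega
  rw [Bool.eq_iff_iff]
  simp only [Bool.or_eq_true, Bool.and_eq_true, beq_iff_eq, decide_eq_true_eq]
  rw [i0M, i3M, i0m, i3m, cM3, cm3, cM0, cm0]
  split_ifs <;> omega

-- B's scan as a filtered map over window indices
theorem pvScanB_spec (l : List (Int × Int)) :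
    pvScanB l = ((List.range (l.length - 3)).filter (fun i =>
        pvAmp (l.getD i (0,0)) (l.getD (i+1) (0,0)) (l.getD (i+2) (0,0)) (l.getD (i+3) (0,0)))).map
      (fun i => (l.getD i (0,0), l.getD (i+3) (0,0))) := by
  fun_induction pvScanB l with
  | case1 p1 p2 p3 p4 rest ih =>
      have hlen : (p1 :: p2 :: p3 :: p4 :: rest).length - 3 = ((p2 :: p3 :: p4 :: rest).length - 3) + 1 := by
        simp
      rw [hlen, List.range_succ_eq_map]
      simp only [List.filter_cons, List.filter_map, Function.comp_def,
        Nat.succ_eq_add_one, List.getD_cons_succ, List.getD_cons_zero]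
      rw [ih]
      by_cases hA : pvAmp p1 p2 p3 p4
      · simp [hA]
      · simp [hA]
  | case2 x h =>
      match x, h with
      | [], _ => rfl
      | [a], _ => rfl
      | [a,b], _ => rfl
      | [a,b,c], _ => rfl
      | a::b::c::d::t, h => exact absurd rfl (h a b c d t)

-- A's scan equals B's (both as the filtered map)
theorem pvScan_eq (l : List (Int × Int)) : pvScanA l = pvScanB l := by
  unfold pvScanA
  rw [PySem.List.foldl_append_if, PySem.List.pyRange_one, List.nil_append]
  have hT : (((l.length : Int) - 3) - 0).toNat = l.length - 3 := by omega
  rw [hT, List.filter_map, List.map_map]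
  simp only [Function.comp_def]
  have h1 : ∀ k : Nat, (0 : Int) + (k : Int) + 1 = ((k + 1 : Nat) : Int) := by
    intro k; push_cast; ring
  have h2 : ∀ k : Nat, (0 : Int) + (k : Int) + 2 = ((k + 2 : Nat) : Int) := by
    intro k; push_cast; ring
  have h3 : ∀ k : Nat, (0 : Int) + (k : Int) + 3 = ((k + 3 : Nat) : Int) := by
    intro k; push_cast; ring
  have h0 : ∀ k : Nat, (0 : Int) + (k : Int) = ((k : Nat) : Int) := by
    intro k; ring
  rw [pvScanB_spec]
  have hpred : ∀ k ∈ List.range (l.length - 3),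
      (pvCheckA (PySem.List.pyGetD l (0 + (k : Int)) (0, 0))
        (PySem.List.pyGetD l (0 + (k : Int) + 1) (0, 0))
        (PySem.List.pyGetD l (0 + (k : Int) + 2) (0, 0))
        (PySem.List.pyGetD l (0 + (k : Int) + 3) (0, 0))) =
      (pvAmp (l.getD k (0,0)) (l.getD (k+1) (0,0)) (l.getD (k+2) (0,0)) (l.getD (k+3) (0,0))) := by
    intro k _
    rw [h1 k, h2 k, h3 k, h0 k]
    simp only [PySem.List.pyGetD_natCast]
    rw [pvCheck_eq]
  rw [List.filter_congr hpred]
  refine List.map_congr_left (fun k _ => ?_)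
  rw [h3 k, h0 k]
  simp only [PySem.List.pyGetD_natCast]

-- a short stack (fewer than 4 elements) is popped one by one
theorem pvGreedyB_short (x : Int × Int) (rest : List (Int × Int)) (out : List (Int × Int))
    (changed : Bool) (h : rest.length < 3) :
    pvGreedyB (x :: rest) out changed = pvGreedyB rest (out ++ [x]) changed := by
  rcases rest with _ | ⟨a, _ | ⟨b, _ | ⟨c, t⟩⟩⟩

  · rw [pvGreedyB]; intro _ _ _ _ he; simp at he
  · rw [pvGreedyB]; intro _ _ _ _ he; simp at he
  · rw [pvGreedyB]; intro _ _ _ _ he; simp at he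
  · simp at h; omega

-- A's indexed greedy loop equals B's stack-consuming loop on the corresponding suffix
theorem pvGreedy_eq (l : List (Int × Int)) (i : Nat) (out : List (Int × Int)) (changed : Bool) :
    pvGreedyA l i out changed = pvGreedyB (l.drop i) out changed := by
  fun_induction pvGreedyA l i out changed with
  | case1 i out changed h1 h2 p1 p2 p3 p4 hc ih =>
      have hg : ∀ j (hj : j < l.length), l.getD j ((0:Int),(0:Int)) = l[j]'hj := fun j hj => List.getD_eq_getElem l _ hj
      have e0 : l.drop i = l.getD i (0,0) :: l.getD (i+1) (0,0) :: l.getD (i+2) (0,0) :: l.getD (i+3) (0,0) :: l.drop (i+4) := by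
        rw [hg i (by omega), hg (i+1) (by omega), hg (i+2) (by omega), hg (i+3) (by omega),
            ← List.getElem_cons_drop (as := l) (i := i) (by omega),
            ← List.getElem_cons_drop (as := l) (i := i+1) (by omega),
            ← List.getElem_cons_drop (as := l) (i := i+2) (by omega),
            ← List.getElem_cons_drop (as := l) (i := i+3) (by omega)]
      have e3 : l.drop (i+3) = l.getD (i+3) (0,0) :: l.drop (i+4) := by
        rw [hg (i+3) (by omega), ← List.getElem_cons_drop (as := l) (i := i+3) (by omega)]
      rw [e0, pvGreedyB]
      rw [pvCheck_eq] at hc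
      rw [if_pos hc, ih, e3]
  | case2 i out changed h1 h2 p1 p2 p3 p4 hc ih =>
      have hg : ∀ j (hj : j < l.length), l.getD j ((0:Int),(0:Int)) = l[j]'hj := fun j hj => List.getD_eq_getElem l _ hj
      have e0 : l.drop i = l.getD i (0,0) :: l.getD (i+1) (0,0) :: l.getD (i+2) (0,0) :: l.getD (i+3) (0,0) :: l.drop (i+4) := by
        rw [hg i (by omega), hg (i+1) (by omega), hg (i+2) (by omega), hg (i+3) (by omega),
            ← List.getElem_cons_drop (as := l) (i := i) (by omega),
            ← List.getElem_cons_drop (as := l) (i := i+1) (by omega),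
            ← List.getElem_cons_drop (as := l) (i := i+2) (by omega),
            ← List.getElem_cons_drop (as := l) (i := i+3) (by omega)]
      have e1 : l.drop (i+1) = l.getD (i+1) (0,0) :: l.getD (i+2) (0,0) :: l.getD (i+3) (0,0) :: l.drop (i+4) := by
        rw [hg (i+1) (by omega), hg (i+2) (by omega), hg (i+3) (by omega),
            ← List.getElem_cons_drop (as := l) (i := i+1) (by omega),
            ← List.getElem_cons_drop (as := l) (i := i+2) (by omega),
            ← List.getElem_cons_drop (as := l) (i := i+3) (by omega)]
      rw [e0, pvGreedyB]
      rw [pvCheck_eq] at hc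
      rw [if_neg hc, ih, e1]
  | case3 i out changed h1 h2 ih =>
      have e0 : l.drop i = l[i] :: l.drop (i+1) := by
        rw [← List.getElem_cons_drop (as := l) (i := i) (by omega)]
      have hlen : (l.drop (i+1)).length < 3 := by
        rw [List.length_drop]; omega
      rw [e0, pvGreedyB_short _ _ _ _ hlen, List.getD_eq_getElem l _ (by omega)] at *
      exact ih
  | case4 i out changed h1 =>
      have : l.drop i = [] := List.drop_eq_nil_of_le (by omega)
      rw [this, pvGreedyB]

-- ===== VERDICT (by name: the statement is the Claim_ definition above) =====
theorem amplitude_merge_one_pass_spec : Claim_equal_amplitude_merge_one_pass := by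
  intro pivots _
  unfold Spec_amplitude_merge_one_pass amplitude_merge_one_pass amplitude_merge_one_pass_alt
  by_cases h : pivots.length < 4
  · simp [h]
  · simp only [if_neg h]
    rw [pvScan_eq, pvGreedy_eq, List.drop_zero]
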